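-- pv_equiv track=rewrite | github.com/emiliopalmerini/quintaedizione-data-ita | scripts/pdf-to-markdown.py | strip_intro_text
-- ===== SOURCE A (Python) =====
-- def strip_intro_text(md: str) -> str:
--     """Remove all text before the first H2 header, keeping only the H1 and entities."""
--     lines = md.split("\n")
--     h1_line = None
--     first_h2_idx = None
--
--     for i, line in enumerate(lines):
--         stripped = line.strip()
--         if stripped.startswith("# ") and not stripped.startswith("## "):
--             h1_line = line
--         if stripped.startswith("## ") and not stripped.startswith("### "):
--             first_h2_idx = i
--             break
--
--     if first_h2_idx is None:
--         return md  # No H2 found, return as-is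
--
--     if h1_line is not None:
--         return h1_line + "\n\n" + "\n".join(lines[first_h2_idx:])
--
--     return "\n".join(lines[first_h2_idx:])
-- ===== SOURCE B (Python) =====
-- def strip_intro_text(md: str) -> str:
--     """Remove all text before the first H2 header, keeping only the H1 and entities."""
--     lines = md.split("\n")
--     idx = next((i for i, line in enumerate(lines)
--                 if line.strip().startswith("## ") and not line.strip().startswith("### ")),
--                None)
--     if idx is None:
--         return md  # No H2 found, return as-is
--     h1 = next((line for line in reversed(lines[:idx])
--                if line.strip().startswith("# ") and not line.strip().startswith("## ")),
--               None)
--     tail = "\n".join(lines[idx:])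
--     return h1 + "\n\n" + tail if h1 is not None else tail
-- ===== Notes on version B (the rewrite author's own statement) =====
-- stated objective: alternative
-- what changed: A's single early-breaking loop carrying both the last-H1 and the first-H2 state is split into two independent passes: a next() over enumerate to locate the first H2, then a back-to-front next() over reversed(lines[:idx]) that finds the last H1 as a first match.
import Mathlib
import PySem

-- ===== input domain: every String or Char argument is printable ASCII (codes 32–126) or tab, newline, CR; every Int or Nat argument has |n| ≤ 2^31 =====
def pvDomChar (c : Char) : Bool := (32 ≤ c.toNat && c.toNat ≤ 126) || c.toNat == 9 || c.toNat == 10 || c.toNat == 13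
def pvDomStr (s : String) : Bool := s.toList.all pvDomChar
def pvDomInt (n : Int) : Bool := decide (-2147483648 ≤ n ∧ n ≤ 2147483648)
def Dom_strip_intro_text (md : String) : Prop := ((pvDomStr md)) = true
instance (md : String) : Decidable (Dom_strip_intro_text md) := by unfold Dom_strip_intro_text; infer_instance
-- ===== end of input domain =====

-- B splits A's single early-breaking loop into two independent passes (find the first-H2 index, then a first match over the reversed prefix for the last H1); same cost, different decomposition.


-- ===== PORT A =====
-- A's loop over enumerate(lines): carries the last H1 seen, breaks at the first H2.
def stripLoopA : List String → Int → Option String → Option String × Option Int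
  | [], _, h1 => (h1, none)
  | line :: rest, i, h1 =>
    let stripped := PySem.Str.strip line
    let h1' := if PySem.Str.startswith stripped "# " && !PySem.Str.startswith stripped "## " then some line else h1
    if PySem.Str.startswith stripped "## " && !PySem.Str.startswith stripped "### " then (h1', some i)
    else stripLoopA rest (i + 1) h1'

def strip_intro_text (md : String) : String :=
  let lines := (PySem.Str.split? md "\n").getD [md]   -- sep = "\n" ≠ "", so split? is always `some`
  match stripLoopA lines 0 none with
  | (_, none) => md
  | (h1, some idx) =>
    let tail := PySem.Str.join "\n" (PySem.List.slice lines (some idx) none)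
    match h1 with
    | some h1l => h1l ++ "\n\n" ++ tail
    | none => tail

-- ===== PORT B =====
def isH2line (line : String) : Bool :=
  PySem.Str.startswith (PySem.Str.strip line) "## " && !PySem.Str.startswith (PySem.Str.strip line) "### "

def isH1line (line : String) : Bool :=
  PySem.Str.startswith (PySem.Str.strip line) "# " && !PySem.Str.startswith (PySem.Str.strip line) "## "

def strip_intro_text_alt (md : String) : String :=
  let lines := (PySem.Str.split? md "\n").getD [md]   -- sep = "\n" ≠ "", so split? is always `some`
  match lines.findIdx? isH2line with                  -- next() over enumerate(lines)
  | none => md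
  | some idx =>
    let h1 := ((lines.take idx).reverse).find? isH1line   -- next() over reversed(lines[:idx])
    let tail := PySem.Str.join "\n" (lines.drop idx)
    match h1 with
    | some h1l => h1l ++ "\n\n" ++ tail
    | none => tail

-- ===== PRECONDITION & SPEC =====
def Spec_strip_intro_text (md : String) (out : String) : Prop := out = strip_intro_text_alt md
instance (md : String) (out : String) : Decidable (Spec_strip_intro_text md out) := by unfold Spec_strip_intro_text; infer_instance

-- ===== CLAIM (what is proved, stated in full; the proofs are below) =====
def Claim_equal_strip_intro_text : Prop := ∀ (md : String), Dom_strip_intro_text md → Spec_strip_intro_text md (strip_intro_text md)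

-- ===== LEMMAS AND PROOFS =====

-- A's two loop conditions ARE B's predicates, definitionally.
theorem condH2_eq (x : String) :
    (PySem.Str.startswith (PySem.Str.strip x) "## " && !PySem.Str.startswith (PySem.Str.strip x) "### ") = isH2line x := rfl
theorem condH1_eq (x : String) :
    (PySem.Str.startswith (PySem.Str.strip x) "# " && !PySem.Str.startswith (PySem.Str.strip x) "## ") = isH1line x := rfl

-- a line matching the H2 test cannot match the H1 test (the H1 test conjoins ¬ startswith "## ")
theorem isH1_of_isH2 (x : String) (h : isH2line x = true) : isH1line x = false := by
  unfold isH2line at h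
  unfold isH1line
  have h' := h
  simp only [Bool.and_eq_true] at h'
  rw [h'.1]
  simp

theorem stripLoopA_snd (lines : List String) (i : Int) (h1 : Option String) :
    (stripLoopA lines i h1).2 = Option.map (fun j : Nat => i + (j : Int)) (lines.findIdx? isH2line) := by
  induction lines generalizing i h1 with
  | nil => simp [stripLoopA]
  | cons x rest ih =>
    rw [List.findIdx?_cons]
    simp only [stripLoopA]
    rw [condH2_eq, condH1_eq]
    by_cases hx : isH2line x = true
    · rw [if_pos hx, if_pos hx]
      simp
    · rw [if_neg hx, if_neg hx, ih]
      cases hr : rest.findIdx? isH2line with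
      | none => simp
      | some k => simp; ring

theorem stripLoopA_fst (lines : List String) (i : Int) (h1 : Option String) (j : Nat)
    (hj : lines.findIdx? isH2line = some j) :
    (stripLoopA lines i h1).1 = ((lines.take j).reverse.find? isH1line).or h1 := by
  induction lines generalizing i h1 j with
  | nil => simp at hj
  | cons x rest ih =>
    rw [List.findIdx?_cons] at hj
    simp only [stripLoopA]
    rw [condH2_eq, condH1_eq]
    by_cases hx : isH2line x = true
    · rw [if_pos hx] at hj
      simp only [Option.some.injEq] at hj
      subst hj
      rw [if_pos hx]
      have h1f : isH1line x = false := isH1_of_isH2 x hx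
      rw [h1f]
      simp
    · rw [if_neg hx] at hj
      obtain ⟨j', hj', rfl⟩ := Option.map_eq_some_iff.mp hj
      rw [if_neg hx, ih _ _ _ hj']
      rw [List.take_succ_cons, List.reverse_cons, List.find?_append, Option.or_assoc]
      have hsingle : (List.find? isH1line [x]).or h1 = if isH1line x = true then some x else h1 := by
        cases hx1 : isH1line x <;> simp [List.find?, hx1]
      rw [hsingle]

-- the two function bodies agree for ANY list of lines
theorem bodies_eq (md : String) (lines : List String) :
    (match stripLoopA lines 0 none with
     | (_, none) => md
     | (h1, some idx) =>
       let tail := PySem.Str.join "\n" (PySem.List.slice lines (some idx) none)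
       match h1 with
       | some h1l => h1l ++ "\n\n" ++ tail
       | none => tail) =
    (match lines.findIdx? isH2line with
     | none => md
     | some idx =>
       let h1 := ((lines.take idx).reverse).find? isH1line
       let tail := PySem.Str.join "\n" (lines.drop idx)
       match h1 with
       | some h1l => h1l ++ "\n\n" ++ tail
       | none => tail) := by
  cases hfind : lines.findIdx? isH2line with
  | none =>
    have h2 := stripLoopA_snd lines 0 none
    rw [hfind, Option.map_none] at h2
    rcases hL : stripLoopA lines 0 none with ⟨a, b⟩
    rw [hL] at h2
    simp only at h2
    subst h2
    rfl
  | some j =>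
    have hLoop : stripLoopA lines 0 none = ((lines.take j).reverse.find? isH1line, some ((j : Nat) : Int)) := by
      have h2 := stripLoopA_snd lines 0 none
      rw [hfind, Option.map_some] at h2
      have h1 := stripLoopA_fst lines 0 none j hfind
      rw [Option.or_none] at h1
      refine Prod.ext ?_ ?_
      · rw [h1]
      · rw [h2]; simp
    rw [hLoop]
    have hslice : PySem.List.slice lines (some ((j : Nat) : Int)) none = lines.drop j := by
      rw [PySem.List.slice_from lines (by positivity : (0:Int) ≤ (j : Nat))]
      simp
    cases hf : (lines.take j).reverse.find? isH1line <;> simp [hf, hslice]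

-- ===== VERDICT (by name: the statement is the Claim_ definition above) =====
theorem strip_intro_text_spec : Claim_equal_strip_intro_text := by
  intro md _
  exact bodies_eq md ((PySem.Str.split? md "\n").getD [md])
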